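-- pv_equiv track=rewrite | github.com/jichen20210919/ambank_airflow_dag | ds_functions.py | ds_field
-- ===== SOURCE A (Python) =====
-- def ds_field(string, delimiter:str, occurrence, num_substr=1):
--     if string is None :
--         return None
--     if delimiter is None or occurrence is None or num_substr is None:
--         raise ValueError("Delimiter, occurrence, and num_substr cannot be null")
--
--     if occurrence < 1:
--         occurrence = 1
--
--     if num_substr < 1:
--         num_substr = 1
--
--     if delimiter == "":
--         return string
--
--     if len(delimiter) > 1:
--         delimiter = delimiter[0:1]
--
--     parts = string.split(delimiter)
--
--     if occurrence > len(parts) + 1: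
--         return ""
--
--     start_index = sum(len(parts[i]) + len(delimiter) for i in range(occurrence - 1))
--     end_index = start_index + sum(
--         len(parts[i]) + len(delimiter) for i in range(occurrence - 1, min(len(parts), occurrence - 1 + num_substr)))
--
--     if occurrence == 1 and delimiter not in string:
--         return string
--
--     return string[start_index:end_index].rstrip(delimiter)
-- ===== SOURCE B (Python) =====
-- def ds_field(string, delimiter: str, occurrence, num_substr=1):
--     if string is None:
--         return None
--     if delimiter is None or occurrence is None or num_substr is None:
--         raise ValueError("Delimiter, occurrence, and num_substr cannot be null")
--     occurrence = max(occurrence, 1)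
--     num_substr = max(num_substr, 1)
--     if delimiter == "":
--         return string
--     d = delimiter[:1]
--     parts = string.split(d)
--     if occurrence > len(parts) + 1:
--         return ""
--     if occurrence == 1 and d not in string:
--         return string
--     m = min(len(parts), occurrence - 1 + num_substr)
--     return d.join(parts[occurrence - 1:m]).rstrip(d)
-- ===== Notes on version B (the rewrite author's own statement) =====
-- stated objective: simpler
-- what changed: B removes A's two character-offset sum computations and the slice of the source string, instead slicing the split parts list and joining it with the delimiter before stripping.
import Mathlib
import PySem

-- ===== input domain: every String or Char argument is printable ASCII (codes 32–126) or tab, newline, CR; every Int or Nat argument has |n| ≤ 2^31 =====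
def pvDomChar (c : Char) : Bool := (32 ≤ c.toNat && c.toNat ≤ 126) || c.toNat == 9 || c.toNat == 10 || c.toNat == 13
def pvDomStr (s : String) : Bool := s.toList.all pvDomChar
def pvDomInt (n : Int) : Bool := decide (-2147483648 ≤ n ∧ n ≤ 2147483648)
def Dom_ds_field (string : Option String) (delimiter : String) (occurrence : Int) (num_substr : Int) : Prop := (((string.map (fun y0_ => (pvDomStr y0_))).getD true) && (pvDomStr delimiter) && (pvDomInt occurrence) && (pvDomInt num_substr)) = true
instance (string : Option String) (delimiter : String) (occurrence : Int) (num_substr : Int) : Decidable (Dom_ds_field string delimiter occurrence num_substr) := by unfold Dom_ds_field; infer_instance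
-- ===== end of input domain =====

-- B drops A's character-offset sum arithmetic and source-string slicing, instead joining a slice of the split parts list (objective: simpler).

-- ===== PORT A =====
-- exact hand port of Python's str.rstrip(chars) (PySem's rstrip takes no chars argument):
-- remove trailing characters that occur in chars
def rstripCharsL (s chars : List Char) : List Char :=
  (List.dropWhile (fun ch => chars.contains ch) s.reverse).reverse

def rstripChars (s chars : String) : String :=
  String.ofList (rstripCharsL s.toList chars.toList)

def ds_field (string : Option String) (delimiter : String) (occurrence : Int) (num_substr : Int) : Option String :=
  match string with
  | none => none
  | some s =>
    let occ := if occurrence < 1 then 1 else occurrence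
    let num := if num_substr < 1 then 1 else num_substr
    if delimiter = "" then some s
    else
      let delim := if 1 < PySem.Str.len delimiter then PySem.Str.slice delimiter (some 0) (some 1) else delimiter
      let parts := (PySem.Str.split? s delim).getD []
      if occ > (parts.length : Int) + 1 then some ""
      else
        let start_index := ((PySem.List.pyRange 0 (occ - 1) 1).map
          (fun i => PySem.Str.len (PySem.List.pyGetD parts i "") + PySem.Str.len delim)).sum
        let end_index := start_index + ((PySem.List.pyRange (occ - 1) (min ((parts.length : Int)) (occ - 1 + num)) 1).map
          (fun i => PySem.Str.len (PySem.List.pyGetD parts i "") + PySem.Str.len delim)).sum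
        if occ = 1 ∧ PySem.Str.isIn delim s = false then some s
        else some (rstripChars (PySem.Str.slice s (some start_index) (some end_index)) delim)

-- ===== PORT B =====
def ds_field_alt (string : Option String) (delimiter : String) (occurrence : Int) (num_substr : Int) : Option String :=
  match string with
  | none => none
  | some s =>
    let occ := max occurrence 1
    let num := max num_substr 1
    if delimiter = "" then some s
    else
      let d := PySem.Str.slice delimiter none (some 1)
      let parts := (PySem.Str.split? s d).getD []
      if occ > (parts.length : Int) + 1 then some ""
      else if occ = 1 ∧ PySem.Str.isIn d s = false then some s
      else
        let m := min ((parts.length : Int)) (occ - 1 + num)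
        some (rstripChars (PySem.Str.join d (PySem.List.slice parts (some (occ - 1)) (some m))) d)

-- ===== PRECONDITION & SPEC =====
def Spec_ds_field (string : Option String) (delimiter : String) (occurrence : Int) (num_substr : Int) (out : Option String) : Prop := out = ds_field_alt string delimiter occurrence num_substr
instance (string : Option String) (delimiter : String) (occurrence : Int) (num_substr : Int) (out : Option String) : Decidable (Spec_ds_field string delimiter occurrence num_substr out) := by unfold Spec_ds_field; infer_instance

-- ===== CLAIM (what is proved, stated in full; the proofs are below) =====
def Claim_equal_ds_field : Prop := ∀ (string : Option String) (delimiter : String) (occurrence : Int) (num_substr : Int), Dom_ds_field string delimiter occurrence num_substr → Spec_ds_field string delimiter occurrence num_substr (ds_field string delimiter occurrence num_substr)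

-- ===== LEMMAS AND PROOFS =====

-- reference recursion for Python's single-character split
def splitC (c : Char) : List Char → List (List Char)
  | [] => [[]]
  | x :: rest => if x = c then [] :: splitC c rest else (splitC c rest).modifyHead (fun h => x :: h)

lemma splitC_ne_nil (c : Char) (l : List Char) : splitC c l ≠ [] := by
  induction l with
  | nil => simp [splitC]
  | cons x r ih =>
    simp only [splitC]
    split
    · simp
    · rcases hh : splitC c r with _ | ⟨h2, t⟩
      · exact absurd hh ih
      · simp

lemma go_eq_splitC (c : Char) (fuel : Nat) (l cur : List Char) (acc : List (List Char))
    (h : l.length < fuel) :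
    PySem.Chars.splitOn.go [c] fuel l cur acc
      = acc.reverse ++ (splitC c l).modifyHead (fun hd => cur.reverse ++ hd) := by
  induction fuel generalizing l cur acc with
  | zero => omega
  | succ f ih =>
    cases l with
    | nil =>
      simp [PySem.Chars.splitOn.go, splitC]
    | cons x rest =>
      rw [PySem.Chars.splitOn.go]
      by_cases hx : x = c
      · subst hx
        have hpre : [x].isPrefixOf (x :: rest) = true := by simp [List.isPrefixOf]
        rw [if_pos hpre]
        have hdrop : List.drop [x].length (x :: rest) = rest := by simp
        rw [hdrop]
        have hlt : rest.length < f := by simpa using h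
        rw [ih _ _ _ hlt]
        have hid : ∀ l : List (List Char), List.modifyHead (fun hd => hd) l = l := by
          intro l
          cases l <;> simp
        simp [splitC, hid]
      · have hpre : [c].isPrefixOf (x :: rest) = false := by
          simp [List.isPrefixOf]
          exact fun hc => absurd hc.symm hx
        rw [if_neg (by simp [hpre])]
        have hlt : rest.length < f := by simpa using h
        rw [ih _ _ _ hlt]
        rcases hh : splitC c rest with _ | ⟨h2, t⟩
        · exact absurd hh (splitC_ne_nil c rest)
        · simp [splitC, hh, if_neg hx]

lemma splitOn_single (cs : List Char) (c : Char) :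
    PySem.Chars.splitOn cs [c] = splitC c cs := by
  unfold PySem.Chars.splitOn
  rw [go_eq_splitC c (cs.length + 1) cs [] [] (by omega)]
  rcases hh : splitC c cs with _ | ⟨h2, t⟩
  · exact absurd hh (splitC_ne_nil c cs)
  · simp

lemma join_splitC (c : Char) (cs : List Char) :
    PySem.Chars.join [c] (splitC c cs) = cs := by
  induction cs with
  | nil => simp [splitC, PySem.Chars.join, List.intercalate]
  | cons x rest ih =>
    simp only [splitC]
    by_cases hx : x = c
    · subst hx
      rw [if_pos rfl]
      rcases hh : splitC x rest with _ | ⟨h2, t⟩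
      · exact absurd hh (splitC_ne_nil x rest)
      · rw [hh] at ih
        rw [PySem.Chars.join_cons_cons]
        simp [ih]
    · rw [if_neg hx]
      rcases hh : splitC c rest with _ | ⟨h2, t⟩
      · exact absurd hh (splitC_ne_nil c rest)
      · rw [hh] at ih
        cases t with
        | nil => simp_all [PySem.Chars.join_singleton]
        | cons t2 tt =>
          rw [PySem.Chars.join_cons_cons] at ih
          simp only [List.modifyHead_cons]
          rw [PySem.Chars.join_cons_cons]
          simp [← ih]

lemma join_append_c (c : Char) (P : List (List Char)) (h : P ≠ []) :
    PySem.Chars.join [c] P ++ [c] = (P.map (fun p => p ++ [c])).flatten := by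
  induction P with
  | nil => exact absurd rfl h
  | cons p t ih =>
    cases t with
    | nil => simp [PySem.Chars.join_singleton]
    | cons t1 tt =>
      have hih := ih (by simp)
      rw [PySem.Chars.join_cons_cons, List.map_cons, List.flatten_cons, ← hih]
      simp [List.append_assoc]

lemma length_flatten_map_c (c : Char) (l : List (List Char)) :
    ((l.map (fun p => p ++ [c])).flatten).length = (l.map (fun p => p.length + 1)).sum := by
  rw [List.length_flatten, List.map_map]
  simp [Function.comp_def]

lemma map_pyGetD_range {α : Type} (xs : List α) (d : α) (a b : Nat) (hab : a ≤ b) (hb : b ≤ xs.length) :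
    (PySem.List.pyRange (a : Int) (b : Int) 1).map (fun i => PySem.List.pyGetD xs i d)
      = (xs.drop a).take (b - a) := by
  apply List.ext_getElem
  · simp [PySem.List.length_pyRange_one]
    omega
  · intro i h1 h2
    have hi : i < b - a := by
      simpa [PySem.List.length_pyRange_one] using h1
    rw [List.getElem_map]
    rw [PySem.List.getElem_pyRange_one]
    have hcast : ((a : Int) + (i : Nat)) = ((a + i : Nat) : Int) := by push_cast; ring
    rw [hcast, PySem.List.pyGetD_natCast]
    have hlt : a + i < xs.length := by omega
    rw [List.getD_eq_getElem xs d hlt]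
    simp [List.getElem_take, List.getElem_drop]

lemma sum_map_int {α : Type} (g : α → Nat) (l : List α) :
    (l.map (fun x => (g x : Int))).sum = ((l.map g).sum : Int) := by
  induction l with
  | nil => simp
  | cons x t ih => simp [ih]

lemma rstrip_append (s : List Char) (c : Char) :
    rstripCharsL (s ++ [c]) [c] = rstripCharsL s [c] := by
  simp [rstripCharsL]

lemma flatten_map_c_ne_nil (c : Char) (l : List (List Char)) (h : l ≠ []) :
    (l.map (fun p => p ++ [c])).flatten ≠ [] := by
  rcases l with _ | ⟨p, t⟩
  · exact absurd rfl h
  · simp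

lemma map_pyGetD_range' {α : Type} (xs : List α) (d : α) (a b : Int) (aN bN : Nat)
    (ha : a = (aN : Int)) (hb : b = (bN : Int)) (hab : aN ≤ bN) (hlen : bN ≤ xs.length) :
    (PySem.List.pyRange a b 1).map (fun i => PySem.List.pyGetD xs i d)
      = (xs.drop aN).take (bN - aN) := by
  subst ha hb
  exact map_pyGetD_range xs d aN bN hab hlen

lemma sum_len_parts (Q : List (List Char)) :
    ((Q.map String.ofList).map (fun p => PySem.Str.len p + 1)).sum
      = (((Q.map (fun q => q.length + 1)).sum : Nat) : Int) := by
  rw [List.map_map, ← sum_map_int (fun q => q.length + 1) Q]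
  congr 1
  apply List.map_congr_left
  intro q _
  simp [PySem.Str.len_eq]

lemma main_chars (cs : List Char) (c : Char) (P : List (List Char))
    (hP : PySem.Chars.join [c] P = cs) (hPne : P ≠ [])
    (k m : Nat) (hkm : k ≤ m) (_hm : m ≤ P.length) :
    rstripCharsL ((cs.drop (((P.take k).map (fun p => p.length + 1)).sum)).take
        ((((P.drop k).take (m - k)).map (fun p => p.length + 1)).sum)) [c]
      = rstripCharsL (PySem.Chars.join [c] ((P.drop k).take (m - k))) [c] := by
  set pre := P.take k with hpre
  set mid := (P.drop k).take (m - k) with hmid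
  set suf := P.drop m with hsuf
  have hms : mid ++ suf = P.drop k := by
    rw [hmid, hsuf]
    have hdd : (P.drop k).drop (m - k) = P.drop m := by
      rw [List.drop_drop]
      congr 1
      omega
    rw [← hdd]
    exact List.take_append_drop _ _
  have hsplit : pre ++ (mid ++ suf) = P := by
    rw [hms, hpre]
    exact List.take_append_drop _ _
  have hflat : cs ++ [c]
      = (pre.map (fun p => p ++ [c])).flatten
        ++ ((mid.map (fun p => p ++ [c])).flatten ++ (suf.map (fun p => p ++ [c])).flatten) := by
    rw [← hP, join_append_c c P hPne, ← hsplit]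
    simp [List.map_append, List.flatten_append]
  have hSA : ((pre.map (fun p => p.length + 1)).sum) = ((pre.map (fun p => p ++ [c])).flatten).length :=
    (length_flatten_map_c c pre).symm
  have hLB : ((mid.map (fun p => p.length + 1)).sum) = ((mid.map (fun p => p ++ [c])).flatten).length :=
    (length_flatten_map_c c mid).symm
  by_cases hmidnil : mid = []
  · simp [hmidnil, PySem.Chars.join, List.intercalate, rstripCharsL]
  · have hBne := flatten_map_c_ne_nil c mid hmidnil
    have hB1 : 0 < ((mid.map (fun p => p ++ [c])).flatten).length := by
      cases hB : (mid.map (fun p => p ++ [c])).flatten with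
      | nil => exact absurd hB hBne
      | cons a b => simp
    have hlen : cs.length + 1
        = ((pre.map (fun p => p ++ [c])).flatten).length
          + (((mid.map (fun p => p ++ [c])).flatten).length
            + ((suf.map (fun p => p ++ [c])).flatten).length) := by
      simpa using congrArg List.length hflat
    rw [hSA, hLB]
    have hjoin : PySem.Chars.join [c] mid ++ [c] = (mid.map (fun p => p ++ [c])).flatten :=
      join_append_c c mid hmidnil
    by_cases hsufnil : suf = []
    · have hC : (suf.map (fun p => p ++ [c])).flatten = [] := by simp [hsufnil]
      rw [hC] at hflat hlen
      simp only [List.append_nil, List.length_nil] at hflat hlen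
      have hAle : ((pre.map (fun p => p ++ [c])).flatten).length ≤ cs.length := by omega
      have hX : cs.drop ((pre.map (fun p => p ++ [c])).flatten).length ++ [c]
          = (mid.map (fun p => p ++ [c])).flatten := by
        have h1 : (cs ++ [c]).drop ((pre.map (fun p => p ++ [c])).flatten).length
            = (mid.map (fun p => p ++ [c])).flatten := by
          rw [hflat]
          exact List.drop_left
        rw [List.drop_append] at h1
        rw [Nat.sub_eq_zero_of_le hAle, List.drop_zero] at h1
        exact h1
      have htake : (cs.drop ((pre.map (fun p => p ++ [c])).flatten).length).take
          ((mid.map (fun p => p ++ [c])).flatten).length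
          = cs.drop ((pre.map (fun p => p ++ [c])).flatten).length := by
        apply List.take_of_length_le
        rw [List.length_drop]
        omega
      rw [htake]
      calc rstripCharsL (cs.drop ((pre.map (fun p => p ++ [c])).flatten).length) [c]
          = rstripCharsL (cs.drop ((pre.map (fun p => p ++ [c])).flatten).length ++ [c]) [c] :=
            (rstrip_append _ c).symm
        _ = rstripCharsL ((mid.map (fun p => p ++ [c])).flatten) [c] := by rw [hX]
        _ = rstripCharsL (PySem.Chars.join [c] mid ++ [c]) [c] := by rw [hjoin]
        _ = _ := rstrip_append _ c
    · have hCne := flatten_map_c_ne_nil c suf hsufnil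
      have hC1 : 0 < ((suf.map (fun p => p ++ [c])).flatten).length := by
        cases hB : (suf.map (fun p => p ++ [c])).flatten with
        | nil => exact absurd hB hCne
        | cons a b => simp
      have hABle : ((pre.map (fun p => p ++ [c])).flatten).length
          + ((mid.map (fun p => p ++ [c])).flatten).length ≤ cs.length := by omega
      have hX : cs.drop ((pre.map (fun p => p ++ [c])).flatten).length ++ [c]
          = (mid.map (fun p => p ++ [c])).flatten ++ (suf.map (fun p => p ++ [c])).flatten := by
        have h1 : (cs ++ [c]).drop ((pre.map (fun p => p ++ [c])).flatten).length
            = (mid.map (fun p => p ++ [c])).flatten ++ (suf.map (fun p => p ++ [c])).flatten := by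
          rw [hflat]
          exact List.drop_left
        rw [List.drop_append] at h1
        rw [Nat.sub_eq_zero_of_le (by omega : ((pre.map (fun p => p ++ [c])).flatten).length ≤ cs.length),
          List.drop_zero] at h1
        exact h1
      have htake : (cs.drop ((pre.map (fun p => p ++ [c])).flatten).length).take
          ((mid.map (fun p => p ++ [c])).flatten).length
          = (mid.map (fun p => p ++ [c])).flatten := by
        have h2 := congrArg (List.take ((mid.map (fun p => p ++ [c])).flatten).length) hX
        rw [List.take_append_of_le_length (by rw [List.length_drop]; omega)] at h2
        rw [List.take_left] at h2
        exact h2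
      rw [htake, ← hjoin]
      exact rstrip_append _ c

lemma string_eq_of_toList {a b : String} (h : a.toList = b.toList) : a = b := by
  have := congrArg String.ofList h
  simpa using this

-- ===== VERDICT (by name: the statement is the Claim_ definition above) =====
set_option maxHeartbeats 1000000 in
theorem ds_field_spec : Claim_equal_ds_field := by
  intro string delimiter occurrence num_substr _
  unfold Spec_ds_field
  cases string with
  | none => rfl
  | some s =>
    simp only [ds_field, ds_field_alt]
    have hocc : (if occurrence < 1 then (1 : Int) else occurrence) = max occurrence 1 := by
      split <;> omega
    have hnum : (if num_substr < 1 then (1 : Int) else num_substr) = max num_substr 1 := by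
      split <;> omega
    rw [hocc, hnum]
    by_cases hd0 : delimiter = ""
    · simp [hd0]
    · simp only [if_neg hd0]
      obtain ⟨c, t, hct⟩ : ∃ c t, delimiter.toList = c :: t := by
        cases h : delimiter.toList with
        | nil => exact absurd (by simpa using congrArg String.ofList h) hd0
        | cons a b => exact ⟨a, b, rfl⟩
      have hdB : PySem.Str.slice delimiter none (some 1) = String.ofList [c] := by
        apply string_eq_of_toList
        simp [PySem.Str.toList_slice, PySem.List.slice_to, hct]
      have hdelim : (if 1 < PySem.Str.len delimiter then PySem.Str.slice delimiter (some 0) (some 1)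
          else delimiter) = String.ofList [c] := by
        by_cases hl : 1 < PySem.Str.len delimiter
        · rw [if_pos hl]
          apply string_eq_of_toList
          simp [PySem.Str.toList_slice, PySem.List.slice_to, hct]
        · rw [if_neg hl]
          apply string_eq_of_toList
          have hlen : (delimiter.toList.length : Int) ≤ 1 := by
            rw [← PySem.Str.len_eq]
            omega
          rw [hct] at hlen ⊢
          have ht : t = [] := by
            cases t with
            | nil => rfl
            | cons a b => simp at hlen; omega
          simp [ht]
      rw [hdelim, hdB]
      have hsplitq : PySem.Str.split? s (String.ofList [c])
          = some ((PySem.Chars.splitOn s.toList [c]).map String.ofList) := by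
        simp [PySem.Str.split?, PySem.Chars.split?]
      rw [hsplitq]
      simp only [Option.getD_some, List.length_map]
      set P := PySem.Chars.splitOn s.toList [c] with hPdef
      by_cases hg1 : max occurrence 1 > (P.length : Int) + 1
      · rw [if_pos hg1, if_pos hg1]
      · rw [if_neg hg1, if_neg hg1]
        by_cases hg2 : max occurrence 1 = 1 ∧ PySem.Str.isIn (String.ofList [c]) s = false
        · rw [if_pos hg2, if_pos hg2]
        · rw [if_neg hg2, if_neg hg2]
          -- naturals for the bounds
          set k : Nat := (max occurrence 1 - 1).toNat with hk
          set nN : Nat := (max num_substr 1).toNat with hn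
          have hkI : ((k : Nat) : Int) = max occurrence 1 - 1 := by omega
          have hnI : ((nN : Nat) : Int) = max num_substr 1 := by omega
          have hkP : k ≤ P.length := by omega
          set mN : Nat := min P.length (k + nN) with hmdef
          have hmI : ((mN : Nat) : Int) = min ((P.length : Int)) (max occurrence 1 - 1 + max num_substr 1) := by
            rw [hmdef, ← hkI, ← hnI]
            push_cast
            omega
          have hmI' : ((mN : Nat) : Int) = min ((P.length : Int)) (((k : Nat) : Int) + ((nN : Nat) : Int)) := by
            rw [hmdef]
            push_cast
            omega
          have hkm : k ≤ mN := by omega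
          have hmP : mN ≤ P.length := by omega
          have hlen1 : PySem.Str.len (String.ofList [c]) = 1 := by
            simp [PySem.Str.len_eq]
          rw [hlen1]
          -- the two character-count sums of A
          have hfun : (fun i => PySem.Str.len (PySem.List.pyGetD (P.map String.ofList) i "") + 1)
              = (fun p => PySem.Str.len p + 1) ∘ (fun i => PySem.List.pyGetD (P.map String.ofList) i "") := rfl
          rw [hfun, ← List.map_map, ← List.map_map]
          rw [map_pyGetD_range' (P.map String.ofList) "" 0 (max occurrence 1 - 1) 0 k (by simp) hkI.symm
            (by omega) (by simpa using hkP)]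
          rw [map_pyGetD_range' (P.map String.ofList) "" (max occurrence 1 - 1)
            (min ((P.length : Int)) (max occurrence 1 - 1 + max num_substr 1)) k mN hkI.symm hmI.symm
            hkm (by simpa using hmP)]
          simp only [List.drop_zero, Nat.sub_zero]
          rw [← List.map_take, ← List.map_drop, ← List.map_take]
          rw [sum_len_parts, sum_len_parts]
          -- the slice of B
          rw [← hkI, ← hnI, ← hmI']
          have hsliceB : PySem.List.slice (P.map String.ofList) (some ((k : Nat) : Int)) (some ((mN : Nat) : Int))
              = ((P.drop k).take (mN - k)).map String.ofList := by
            rw [PySem.List.slice_natCast, ← List.map_drop, ← List.map_take]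
          rw [hsliceB]
          refine congrArg some ?_
          unfold rstripChars
          refine congrArg String.ofList ?_
          simp only [String.toList_ofList]
          rw [PySem.Str.toList_slice, PySem.Chars.slice_eq_listSlice]
          have hcast : (((((P.take k).map (fun q => q.length + 1)).sum : Nat) : Int)
              + ((((((P.drop k).take (mN - k))).map (fun q => q.length + 1)).sum : Nat) : Int))
              = (((((P.take k).map (fun q => q.length + 1)).sum
                  + ((((P.drop k).take (mN - k))).map (fun q => q.length + 1)).sum : Nat)) : Int) := by
            push_cast
            ring
          rw [hcast, PySem.List.slice_natCast, Nat.add_sub_cancel_left]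
          have hjoinB : (PySem.Str.join (String.ofList [c]) (((P.drop k).take (mN - k)).map String.ofList)).toList
              = PySem.Chars.join [c] ((P.drop k).take (mN - k)) := by
            rw [PySem.Str.toList_join]
            simp [List.map_map, Function.comp_def]
          rw [hjoinB]
          have hP : PySem.Chars.join [c] P = s.toList := by
            rw [hPdef, splitOn_single]
            exact join_splitC c s.toList
          have hPne : P ≠ [] := by
            rw [hPdef, splitOn_single]
            exact splitC_ne_nil c s.toList
          exact main_chars s.toList c P hP hPne k mN hkm hmP
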